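-- pv_equiv track=rewrite | github.com/schiob/TestingSistemas | ago-dic-2017/Luis Clemente Zúñiga Flores/Práctica 1/suma.py | suma_nums
-- ===== SOURCE A (Python) =====
-- def suma_nums(arr):
-- 	contador =0
-- 	lista = []
-- 	while contador < 5:
-- 		suma = 0
-- 		for i in arr:
-- 			suma+=i
-- 		suma-=arr[contador]
-- 		lista.append(suma)
-- 		contador+=1
-- 	lista.sort()
--
-- 	resultado = "%d %d" %(lista[0],lista[len(lista)-1])
-- 	return resultado
-- ===== SOURCE B (Python) =====
-- def suma_nums(arr):
--     total = sum(arr)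
--     vals = [total - arr[i] for i in range(5)]
--     return "%d %d" % (min(vals), max(vals))
-- ===== Notes on version B (the rewrite author's own statement) =====
-- stated objective: faster
-- what changed: Computes the total sum once and takes min/max of the five candidates directly, instead of re-summing the whole array five times and sorting the candidate list.
import Mathlib
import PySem

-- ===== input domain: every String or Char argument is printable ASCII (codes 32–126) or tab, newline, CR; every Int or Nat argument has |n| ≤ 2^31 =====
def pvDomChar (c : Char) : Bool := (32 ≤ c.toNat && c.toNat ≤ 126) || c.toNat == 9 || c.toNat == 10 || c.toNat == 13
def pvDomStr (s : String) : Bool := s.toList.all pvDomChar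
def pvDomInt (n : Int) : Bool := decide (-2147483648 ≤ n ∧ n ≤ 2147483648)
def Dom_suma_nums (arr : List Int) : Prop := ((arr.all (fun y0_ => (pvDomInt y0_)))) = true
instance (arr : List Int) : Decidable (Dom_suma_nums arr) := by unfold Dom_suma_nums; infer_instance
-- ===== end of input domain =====

-- B computes the total sum once and takes min/max of the five candidates,
-- instead of A's five full re-summations followed by a sort. Return-value equivalence.

-- ===== PORT A =====
def suma_nums (arr : List Int) : String :=
  -- while contador < 5: re-sum arr, subtract arr[contador], append
  let lista : List Int :=
    (PySem.List.pyRange 0 5 1).foldl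
      (fun lista contador =>
        let suma := arr.foldl (fun suma i => suma + i) 0
        let suma := suma - PySem.List.pyGetD arr contador 0
        lista ++ [suma]) []
  let lista := PySem.List.sorted lista (fun x => x) false
  PySem.Int.toStr (PySem.List.pyGetD lista 0 0) ++ " " ++
    PySem.Int.toStr (PySem.List.pyGetD lista (PySem.List.len lista - 1) 0)

-- ===== PORT B =====
def suma_nums_alt (arr : List Int) : String :=
  let total := arr.sum
  let vals := (PySem.List.pyRange 0 5 1).map (fun i => total - PySem.List.pyGetD arr i 0)
  PySem.Int.toStr ((PySem.List.min? vals (fun x => x)).getD 0) ++ " " ++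
    PySem.Int.toStr ((PySem.List.max? vals (fun x => x)).getD 0)

-- ===== PRECONDITION & SPEC =====
-- A indexes arr[0..4], raising IndexError when the list has fewer than 5 elements (B raises there too).
def Pre_suma_nums (arr : List Int) : Prop := 5 ≤ arr.length
instance (arr : List Int) : Decidable (Pre_suma_nums arr) := by unfold Pre_suma_nums; infer_instance
def pvWitness_suma_nums : List Int := ([1, 2, 3, 4, 5])

def Spec_suma_nums (arr : List Int) (out : String) : Prop := out = suma_nums_alt arr
instance (arr : List Int) (out : String) : Decidable (Spec_suma_nums arr out) := by unfold Spec_suma_nums; infer_instance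

-- ===== CLAIM (what is proved, stated in full; the proofs are below) =====
def Claim_equal_suma_nums : Prop := ∀ (arr : List Int), Dom_suma_nums arr → Pre_suma_nums arr → Spec_suma_nums arr (suma_nums arr)

-- ===== LEMMAS AND PROOFS =====

-- head of a (key = id) sorted list equals Python min's value
lemma head_sorted_eq_min (l : List Int) (m : Int) (t : List Int)
    (hs : PySem.List.sorted l (fun x => x) false = m :: t) :
    (PySem.List.min? l (fun x => x)).getD 0 = m := by
  have hle : ∀ y ∈ l, m ≤ y := PySem.List.key_head_sorted_le l (fun x => x) hs
  have hm : m ∈ l := by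
    have : m ∈ PySem.List.sorted l (fun x => x) false := by simp [hs]
    simpa [PySem.List.mem_sorted] using this
  obtain ⟨m0, hm0⟩ : ∃ m0, PySem.List.min? l (fun x => x) = some m0 := by
    cases h : PySem.List.min? l (fun x => x) with
    | none =>
      exact absurd ((PySem.List.min?_eq_none_iff l (fun x => x)).mp h)
        (by rintro rfl; simp at hm)
    | some m0 => exact ⟨m0, rfl⟩
  have hmem0 : m0 ∈ l := PySem.List.min?_mem hm0
  have h1 : m0 ≤ m := PySem.List.min?_isMin hm0 m hm
  have h2 : m ≤ m0 := hle m0 hmem0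
  simp only [hm0, Option.getD_some]
  omega

-- last of a (key = id) sorted list equals Python max's value
lemma last_sorted_eq_max (l : List Int) (h : PySem.List.sorted l (fun x => x) false ≠ []) :
    (PySem.List.max? l (fun x => x)).getD 0 = (PySem.List.sorted l (fun x => x) false).getLast h := by
  have hpw : (PySem.List.sorted l (fun x => x) false).Pairwise (fun a b => a ≤ b) :=
    PySem.List.sorted_pairwise l (fun x => x)
  have hrev : (PySem.List.sorted l (fun x => x) false).reverse ≠ [] := by simpa using h
  obtain ⟨m, t, hmt⟩ := List.exists_cons_of_ne_nil hrev
  have hseq : PySem.List.sorted l (fun x => x) false = t.reverse ++ [m] := by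
    rw [← List.reverse_reverse (PySem.List.sorted l (fun x => x) false), hmt]
    simp
  have hlast : (PySem.List.sorted l (fun x => x) false).getLast h = m := by
    simp [hseq]
  have hle : ∀ y ∈ t.reverse, y ≤ m := by
    have := (List.pairwise_append.mp (hseq ▸ hpw)).2.2
    intro y hy
    exact this y hy m (by simp)
  have hge : ∀ y ∈ l, y ≤ m := by
    intro y hy
    have : y ∈ PySem.List.sorted l (fun x => x) false :=
      (PySem.List.mem_sorted l (fun x => x) false y).mpr hy
    rw [hseq] at this
    rcases List.mem_append.mp this with h1 | h1
    · exact hle y h1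
    · simp at h1; omega
  have hm : m ∈ l := by
    have : m ∈ PySem.List.sorted l (fun x => x) false := by rw [hseq]; simp
    exact (PySem.List.mem_sorted l (fun x => x) false m).mp this
  obtain ⟨M, hM⟩ : ∃ M, PySem.List.max? l (fun x => x) = some M := by
    cases hmx : PySem.List.max? l (fun x => x) with
    | none =>
      exact absurd ((PySem.List.max?_eq_none_iff l (fun x => x)).mp hmx)
        (by rintro rfl; exact h rfl)
    | some M => exact ⟨M, rfl⟩
  have hMmem : M ∈ l := PySem.List.max?_mem hM
  have h1 : m ≤ M := PySem.List.max?_isMax hM m hm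
  have h2 : M ≤ m := hge M hMmem
  rw [hlast]
  simp only [hM, Option.getD_some]
  omega

-- ===== VERDICT (by name: the statement is the Claim_ definition above) =====
theorem suma_nums_spec : Claim_equal_suma_nums := by
  intro arr _ hpre
  unfold Spec_suma_nums suma_nums suma_nums_alt
  have hsum : arr.foldl (fun suma i => suma + i) 0 = arr.sum := by
    rw [List.sum_eq_foldl]
  -- the two candidate lists coincide
  have hlist :
      (PySem.List.pyRange 0 5 1).foldl
        (fun lista contador =>
          lista ++ [arr.foldl (fun suma i => suma + i) 0 - PySem.List.pyGetD arr contador 0]) [] =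
      (PySem.List.pyRange 0 5 1).map (fun i => arr.sum - PySem.List.pyGetD arr i 0) := by
    simp only [hsum]
    simpa using PySem.List.foldl_append_singleton_eq_map
      (fun i => arr.sum - PySem.List.pyGetD arr i 0) (PySem.List.pyRange 0 5 1) []
  simp only [hlist]
  set L := (PySem.List.pyRange 0 5 1).map (fun i => arr.sum - PySem.List.pyGetD arr i 0) with hL
  have hlen : L.length = 5 := by simp [hL, PySem.List.pyRange]
  set s := PySem.List.sorted L (fun x => x) false with hs
  have hslen : s.length = 5 := by rw [hs, PySem.List.length_sorted, hlen]
  have hsne : s ≠ [] := by intro h0; rw [h0] at hslen; simp at hslen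
  obtain ⟨m, t, hmt⟩ := List.exists_cons_of_ne_nil hsne
  have hmin : (PySem.List.min? L (fun x => x)).getD 0 = m := head_sorted_eq_min L m t (by rw [← hs, hmt])
  have hhead : PySem.List.pyGetD s 0 0 = m := by rw [hmt]; simp [PySem.List.pyGetD_zero_cons]
  have hlast : PySem.List.pyGetD s (PySem.List.len s - 1) 0 = s.getLast hsne := by
    have : PySem.List.len s - 1 = (4 : Int) := by simp [hslen]
    rw [this]
    have h4 : (4 : Int) = ((4 : Nat) : Int) := by norm_num
    rw [h4, PySem.List.pyGetD_natCast]
    rw [List.getLast_eq_getElem]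
    rw [List.getD_eq_getElem?_getD]
    simp [hslen]
  have hmax : (PySem.List.max? L (fun x => x)).getD 0 = s.getLast hsne := last_sorted_eq_max L hsne
  rw [hhead, hlast, hmin, hmax]
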